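-- pv_equiv track=rewrite | github.com/AlexandreGazagnes/guitar-book | src/helpers.py | _from_date_to_generation
-- ===== SOURCE A (Python) =====
-- def _from_date_to_generation(date):
--     """ """
--     li = [
--         (1900, 1920),
--         (1920, 1940),
--         (1940, 1950),
--         (1950, 1960),
--         (1960, 1970),
--         (1970, 1980),
--         (1980, 1990),
--         (1990, 2000),
--         (2000, 2010),
--         (2010, 2015),
--         (2015, 2020),
--         (2020, 2025),
--     ]
--     for x, y in li:
--         if x <= date < y:
--             return f"{x}-{y}"
--
--     return ""
-- ===== SOURCE B (Python) =====
-- # Closed-form arithmetic: pick the bin width for the date's era, then snap the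
-- # date down to its bin start; no per-interval list scan.
-- def _from_date_to_generation(date):
--     if 1900 <= date < 1940:
--         w = 20
--     elif 1940 <= date < 2010:
--         w = 10
--     elif 2010 <= date < 2025:
--         w = 5
--     else:
--         return ""
--     x = date - (date - 1900) % w
--     return f"{x}-{x + w}"
-- ===== Notes on version B (the rewrite author's own statement) =====
-- stated objective: simpler
-- what changed: Replaces the per-interval linear scan with closed-form arithmetic: choose the era's bin width and snap the date to its bin start with a modulo.
import Mathlib
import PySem

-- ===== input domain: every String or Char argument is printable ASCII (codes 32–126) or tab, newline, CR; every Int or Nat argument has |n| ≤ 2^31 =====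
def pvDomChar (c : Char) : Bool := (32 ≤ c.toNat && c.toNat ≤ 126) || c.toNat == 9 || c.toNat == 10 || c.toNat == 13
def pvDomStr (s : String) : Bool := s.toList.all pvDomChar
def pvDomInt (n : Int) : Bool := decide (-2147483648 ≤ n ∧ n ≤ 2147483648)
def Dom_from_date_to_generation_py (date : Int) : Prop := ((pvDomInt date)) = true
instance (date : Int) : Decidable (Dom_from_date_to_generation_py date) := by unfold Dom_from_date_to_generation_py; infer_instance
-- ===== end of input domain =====

-- B replaces A's 12-interval scan by closed-form width selection + modulo snapping (simpler).

-- ===== PORT A =====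
-- the for-loop over the literal interval list, with early return on the first match
def pvScanA (date : Int) : List (Int × Int) → String
  | [] => ""
  | (x, y) :: rest =>
      if x ≤ date ∧ date < y then PySem.Int.toStr x ++ "-" ++ PySem.Int.toStr y
      else pvScanA date rest

def from_date_to_generation_py (date : Int) : String :=
  pvScanA date
    [(1900, 1920), (1920, 1940), (1940, 1950), (1950, 1960), (1960, 1970),
     (1970, 1980), (1980, 1990), (1990, 2000), (2000, 2010), (2010, 2015),
     (2015, 2020), (2020, 2025)]

-- ===== PORT B =====
-- f"{x}-{x+w}" for the bin start x = date - (date - 1900) % w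
def pvGenLabel (date w : Int) : String :=
  let x := date - PySem.Int.mod (date - 1900) w
  PySem.Int.toStr x ++ "-" ++ PySem.Int.toStr (x + w)

def from_date_to_generation_py_alt (date : Int) : String :=
  if 1900 ≤ date ∧ date < 1940 then pvGenLabel date 20
  else if 1940 ≤ date ∧ date < 2010 then pvGenLabel date 10
  else if 2010 ≤ date ∧ date < 2025 then pvGenLabel date 5
  else ""

-- ===== PRECONDITION & SPEC =====
def Spec_from_date_to_generation_py (date : Int) (out : String) : Prop := out = from_date_to_generation_py_alt date
instance (date : Int) (out : String) : Decidable (Spec_from_date_to_generation_py date out) := by unfold Spec_from_date_to_generation_py; infer_instance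

-- ===== CLAIM (what is proved, stated in full; the proofs are below) =====
def Claim_equal_from_date_to_generation_py : Prop := ∀ (date : Int), Dom_from_date_to_generation_py date → Spec_from_date_to_generation_py date (from_date_to_generation_py date)

-- ===== LEMMAS AND PROOFS =====

-- in the interval [x, x+w), snapping with the modulo recovers x
theorem pvGenLabel_eq (date x w : Int) (hw : 0 < w) (h1 : x ≤ date) (h2 : date < x + w)
    (h3 : w ∣ (x - 1900)) :
    pvGenLabel date w = PySem.Int.toStr x ++ "-" ++ PySem.Int.toStr (x + w) := by
  have hm : PySem.Int.mod (date - 1900) w = date - x := by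
    rw [PySem.Int.mod_eq_emod_of_pos hw]
    obtain ⟨k, hk⟩ := h3
    have : date - 1900 = (date - x) + w * k := by omega
    rw [this, Int.add_mul_emod_self_left]
    exact Int.emod_eq_of_lt (by omega) (by omega)
  have hx : date - (date - x) = x := by omega
  simp only [pvGenLabel, hm, hx]

-- ===== VERDICT (by name: the statement is the Claim_ definition above) =====
theorem from_date_to_generation_py_spec : Claim_equal_from_date_to_generation_py := by
  unfold Claim_equal_from_date_to_generation_py
  intro date _
  unfold Spec_from_date_to_generation_py
  rcases (by omega :
      date < 1900 ∨ (1900 ≤ date ∧ date < 1920) ∨ (1920 ≤ date ∧ date < 1940) ∨ (1940 ≤ date ∧ date < 1950) ∨ (1950 ≤ date ∧ date < 1960) ∨ (1960 ≤ date ∧ date < 1970) ∨ (1970 ≤ date ∧ date < 1980) ∨ (1980 ≤ date ∧ date < 1990) ∨ (1990 ≤ date ∧ date < 2000) ∨ (2000 ≤ date ∧ date < 2010) ∨ (2010 ≤ date ∧ date < 2015) ∨ (2015 ≤ date ∧ date < 2020) ∨ (2020 ≤ date ∧ date < 2025) ∨ 2025 ≤ date) with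
    h | h | h | h | h | h | h | h | h | h | h | h | h | h
  · -- date < 1900
    have hA : from_date_to_generation_py date = "" := by
      simp only [from_date_to_generation_py, pvScanA]
      rw [if_neg (by omega), if_neg (by omega), if_neg (by omega), if_neg (by omega), if_neg (by omega), if_neg (by omega), if_neg (by omega), if_neg (by omega), if_neg (by omega), if_neg (by omega), if_neg (by omega), if_neg (by omega)]
    have hB : from_date_to_generation_py_alt date = "" := by
      simp only [from_date_to_generation_py_alt]
      rw [if_neg (by omega), if_neg (by omega), if_neg (by omega)]
    rw [hA, hB]
  · -- 1900 ≤ date < 1920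
    have hA : from_date_to_generation_py date =
        PySem.Int.toStr 1900 ++ "-" ++ PySem.Int.toStr 1920 := by
      simp only [from_date_to_generation_py, pvScanA]
      rw [if_pos (by omega)]
    have hB : from_date_to_generation_py_alt date = pvGenLabel date 20 := by
      simp only [from_date_to_generation_py_alt]
      rw [if_pos (by omega)]
    rw [hA, hB]
    exact (pvGenLabel_eq date 1900 20 (by norm_num) (by omega) (by omega) (by decide)).symm
  · -- 1920 ≤ date < 1940
    have hA : from_date_to_generation_py date =
        PySem.Int.toStr 1920 ++ "-" ++ PySem.Int.toStr 1940 := by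
      simp only [from_date_to_generation_py, pvScanA]
      rw [if_neg (by omega), if_pos (by omega)]
    have hB : from_date_to_generation_py_alt date = pvGenLabel date 20 := by
      simp only [from_date_to_generation_py_alt]
      rw [if_pos (by omega)]
    rw [hA, hB]
    exact (pvGenLabel_eq date 1920 20 (by norm_num) (by omega) (by omega) (by decide)).symm
  · -- 1940 ≤ date < 1950
    have hA : from_date_to_generation_py date =
        PySem.Int.toStr 1940 ++ "-" ++ PySem.Int.toStr 1950 := by
      simp only [from_date_to_generation_py, pvScanA]
      rw [if_neg (by omega), if_neg (by omega), if_pos (by omega)]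
    have hB : from_date_to_generation_py_alt date = pvGenLabel date 10 := by
      simp only [from_date_to_generation_py_alt]
      rw [if_neg (by omega), if_pos (by omega)]
    rw [hA, hB]
    exact (pvGenLabel_eq date 1940 10 (by norm_num) (by omega) (by omega) (by decide)).symm
  · -- 1950 ≤ date < 1960
    have hA : from_date_to_generation_py date =
        PySem.Int.toStr 1950 ++ "-" ++ PySem.Int.toStr 1960 := by
      simp only [from_date_to_generation_py, pvScanA]
      rw [if_neg (by omega), if_neg (by omega), if_neg (by omega), if_pos (by omega)]
    have hB : from_date_to_generation_py_alt date = pvGenLabel date 10 := by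
      simp only [from_date_to_generation_py_alt]
      rw [if_neg (by omega), if_pos (by omega)]
    rw [hA, hB]
    exact (pvGenLabel_eq date 1950 10 (by norm_num) (by omega) (by omega) (by decide)).symm
  · -- 1960 ≤ date < 1970
    have hA : from_date_to_generation_py date =
        PySem.Int.toStr 1960 ++ "-" ++ PySem.Int.toStr 1970 := by
      simp only [from_date_to_generation_py, pvScanA]
      rw [if_neg (by omega), if_neg (by omega), if_neg (by omega), if_neg (by omega), if_pos (by omega)]
    have hB : from_date_to_generation_py_alt date = pvGenLabel date 10 := by
      simp only [from_date_to_generation_py_alt]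
      rw [if_neg (by omega), if_pos (by omega)]
    rw [hA, hB]
    exact (pvGenLabel_eq date 1960 10 (by norm_num) (by omega) (by omega) (by decide)).symm
  · -- 1970 ≤ date < 1980
    have hA : from_date_to_generation_py date =
        PySem.Int.toStr 1970 ++ "-" ++ PySem.Int.toStr 1980 := by
      simp only [from_date_to_generation_py, pvScanA]
      rw [if_neg (by omega), if_neg (by omega), if_neg (by omega), if_neg (by omega), if_neg (by omega), if_pos (by omega)]
    have hB : from_date_to_generation_py_alt date = pvGenLabel date 10 := by
      simp only [from_date_to_generation_py_alt]
      rw [if_neg (by omega), if_pos (by omega)]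
    rw [hA, hB]
    exact (pvGenLabel_eq date 1970 10 (by norm_num) (by omega) (by omega) (by decide)).symm
  · -- 1980 ≤ date < 1990
    have hA : from_date_to_generation_py date =
        PySem.Int.toStr 1980 ++ "-" ++ PySem.Int.toStr 1990 := by
      simp only [from_date_to_generation_py, pvScanA]
      rw [if_neg (by omega), if_neg (by omega), if_neg (by omega), if_neg (by omega), if_neg (by omega), if_neg (by omega), if_pos (by omega)]
    have hB : from_date_to_generation_py_alt date = pvGenLabel date 10 := by
      simp only [from_date_to_generation_py_alt]
      rw [if_neg (by omega), if_pos (by omega)]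
    rw [hA, hB]
    exact (pvGenLabel_eq date 1980 10 (by norm_num) (by omega) (by omega) (by decide)).symm
  · -- 1990 ≤ date < 2000
    have hA : from_date_to_generation_py date =
        PySem.Int.toStr 1990 ++ "-" ++ PySem.Int.toStr 2000 := by
      simp only [from_date_to_generation_py, pvScanA]
      rw [if_neg (by omega), if_neg (by omega), if_neg (by omega), if_neg (by omega), if_neg (by omega), if_neg (by omega), if_neg (by omega), if_pos (by omega)]
    have hB : from_date_to_generation_py_alt date = pvGenLabel date 10 := by
      simp only [from_date_to_generation_py_alt]
      rw [if_neg (by omega), if_pos (by omega)]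
    rw [hA, hB]
    exact (pvGenLabel_eq date 1990 10 (by norm_num) (by omega) (by omega) (by decide)).symm
  · -- 2000 ≤ date < 2010
    have hA : from_date_to_generation_py date =
        PySem.Int.toStr 2000 ++ "-" ++ PySem.Int.toStr 2010 := by
      simp only [from_date_to_generation_py, pvScanA]
      rw [if_neg (by omega), if_neg (by omega), if_neg (by omega), if_neg (by omega), if_neg (by omega), if_neg (by omega), if_neg (by omega), if_neg (by omega), if_pos (by omega)]
    have hB : from_date_to_generation_py_alt date = pvGenLabel date 10 := by
      simp only [from_date_to_generation_py_alt]
      rw [if_neg (by omega), if_pos (by omega)]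
    rw [hA, hB]
    exact (pvGenLabel_eq date 2000 10 (by norm_num) (by omega) (by omega) (by decide)).symm
  · -- 2010 ≤ date < 2015
    have hA : from_date_to_generation_py date =
        PySem.Int.toStr 2010 ++ "-" ++ PySem.Int.toStr 2015 := by
      simp only [from_date_to_generation_py, pvScanA]
      rw [if_neg (by omega), if_neg (by omega), if_neg (by omega), if_neg (by omega), if_neg (by omega), if_neg (by omega), if_neg (by omega), if_neg (by omega), if_neg (by omega), if_pos (by omega)]
    have hB : from_date_to_generation_py_alt date = pvGenLabel date 5 := by
      simp only [from_date_to_generation_py_alt]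
      rw [if_neg (by omega), if_neg (by omega), if_pos (by omega)]
    rw [hA, hB]
    exact (pvGenLabel_eq date 2010 5 (by norm_num) (by omega) (by omega) (by decide)).symm
  · -- 2015 ≤ date < 2020
    have hA : from_date_to_generation_py date =
        PySem.Int.toStr 2015 ++ "-" ++ PySem.Int.toStr 2020 := by
      simp only [from_date_to_generation_py, pvScanA]
      rw [if_neg (by omega), if_neg (by omega), if_neg (by omega), if_neg (by omega), if_neg (by omega), if_neg (by omega), if_neg (by omega), if_neg (by omega), if_neg (by omega), if_neg (by omega), if_pos (by omega)]
    have hB : from_date_to_generation_py_alt date = pvGenLabel date 5 := by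
      simp only [from_date_to_generation_py_alt]
      rw [if_neg (by omega), if_neg (by omega), if_pos (by omega)]
    rw [hA, hB]
    exact (pvGenLabel_eq date 2015 5 (by norm_num) (by omega) (by omega) (by decide)).symm
  · -- 2020 ≤ date < 2025
    have hA : from_date_to_generation_py date =
        PySem.Int.toStr 2020 ++ "-" ++ PySem.Int.toStr 2025 := by
      simp only [from_date_to_generation_py, pvScanA]
      rw [if_neg (by omega), if_neg (by omega), if_neg (by omega), if_neg (by omega), if_neg (by omega), if_neg (by omega), if_neg (by omega), if_neg (by omega), if_neg (by omega), if_neg (by omega), if_neg (by omega), if_pos (by omega)]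
    have hB : from_date_to_generation_py_alt date = pvGenLabel date 5 := by
      simp only [from_date_to_generation_py_alt]
      rw [if_neg (by omega), if_neg (by omega), if_pos (by omega)]
    rw [hA, hB]
    exact (pvGenLabel_eq date 2020 5 (by norm_num) (by omega) (by omega) (by decide)).symm
  · -- 2025 ≤ date
    have hA : from_date_to_generation_py date = "" := by
      simp only [from_date_to_generation_py, pvScanA]
      rw [if_neg (by omega), if_neg (by omega), if_neg (by omega), if_neg (by omega), if_neg (by omega), if_neg (by omega), if_neg (by omega), if_neg (by omega), if_neg (by omega), if_neg (by omega), if_neg (by omega), if_neg (by omega)]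
    have hB : from_date_to_generation_py_alt date = "" := by
      simp only [from_date_to_generation_py_alt]
      rw [if_neg (by omega), if_neg (by omega), if_neg (by omega)]
    rw [hA, hB]
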